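-- pv_equiv track=rewrite | github.com/newgardener/python-algo-note | 01. array/leetcode/hashmap/pair/532-k-diff_pairs_in_an_array.py | findPairs
-- ===== SOURCE A (Python) =====
-- from collections import defaultdict
--
-- def findPairs(nums: list[int], k: int) -> int:
--     counts = defaultdict(int)
--     res = set()
--
--     for i, num in enumerate(nums):
--         if num - k in counts:
--             res.add((num, num - k) if num <= num - k else (num - k, num))
--         if num - k != num + k and num + k in counts:
--             res.add((num, num + k) if num <= num + k else (num + k, num))
--         counts[num] += 1
--
--     return len(res)
-- ===== SOURCE B (Python) =====
-- from collections import Counter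
--
-- def findPairs(nums: list[int], k: int) -> int:
--     freq = Counter(nums)
--     d = abs(k)
--     if d == 0:
--         return sum(1 for c in freq.values() if c >= 2)
--     return sum(1 for x in freq if x + d in freq)
-- ===== Notes on version B (the rewrite author's own statement) =====
-- stated objective: simpler
-- what changed: A's online single pass maintaining a pair-set of tuples is replaced by building Counter(nums) first and then counting in a second pass over the table (values with count >= 2 when k == 0, distinct keys x with x+|k| also a key otherwise); no pair-set is kept.
import Mathlib
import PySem

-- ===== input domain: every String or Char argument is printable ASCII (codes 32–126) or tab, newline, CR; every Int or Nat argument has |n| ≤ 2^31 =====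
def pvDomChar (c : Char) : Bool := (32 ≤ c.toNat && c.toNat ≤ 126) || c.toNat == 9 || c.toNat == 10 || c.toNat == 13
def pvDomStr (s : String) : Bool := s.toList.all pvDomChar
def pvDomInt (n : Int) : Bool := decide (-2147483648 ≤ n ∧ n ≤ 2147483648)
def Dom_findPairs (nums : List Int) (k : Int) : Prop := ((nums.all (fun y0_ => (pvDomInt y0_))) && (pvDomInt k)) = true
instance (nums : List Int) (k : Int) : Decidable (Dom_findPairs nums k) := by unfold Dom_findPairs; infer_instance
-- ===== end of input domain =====

-- B builds the full frequency table first and counts over its distinct keys in a second pass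
-- (no pair-set is kept); objective: simpler. Proved equal to A on all inputs in Dom.


-- ===== PORT A =====
-- literal transliteration of A: one pass over enumerate(nums), maintaining the counts dict
-- (defaultdict(int): counts[num] += 1 is modify num 0 (·+1)) and the result pair-set.
def findPairs (nums : List Int) (k : Int) : Int :=
  let st := (PySem.List.enumerate nums).foldl
    (fun (st : PySem.Dict Int Int × PySem.Set (Int × Int)) p =>
      let num := p.2
      let res := if st.1.contains (num - k) then
          PySem.Set.add st.2 (if num ≤ num - k then (num, num - k) else (num - k, num))
        else st.2
      let res := if num - k ≠ num + k ∧ st.1.contains (num + k) = true then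
          PySem.Set.add res (if num ≤ num + k then (num, num + k) else (num + k, num))
        else res
      (st.1.modify num 0 (· + 1), res))
    (PySem.Dict.empty, PySem.Set.empty)
  PySem.Set.len st.2

-- ===== PORT B =====
-- B: Counter(nums) first, then a separate pass over the table (values for k = 0, keys otherwise).
def findPairs_alt (nums : List Int) (k : Int) : Int :=
  let freq := PySem.Dict.counter nums
  let d := |k|
  if d = 0 then
    ((freq.values.countP (fun c => decide (2 ≤ c)) : Nat) : Int)
  else
    ((freq.keys.countP (fun x => freq.contains (x + d)) : Nat) : Int)

-- ===== PRECONDITION & SPEC =====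
def Spec_findPairs (nums : List Int) (k : Int) (out : Int) : Prop := out = findPairs_alt nums k
instance (nums : List Int) (k : Int) (out : Int) : Decidable (Spec_findPairs nums k out) := by unfold Spec_findPairs; infer_instance

-- ===== CLAIM (what is proved, stated in full; the proofs are below) =====
def Claim_equal_findPairs : Prop := ∀ (nums : List Int) (k : Int), Dom_findPairs nums k → Spec_findPairs nums k (findPairs nums k)

-- ===== LEMMAS AND PROOFS =====

-- A's loop body, named, over the element alone (the enumerate index is unused).
def pvStep (k : Int) (st : PySem.Dict Int Int × PySem.Set (Int × Int)) (num : Int) :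
    PySem.Dict Int Int × PySem.Set (Int × Int) :=
  let res := if st.1.contains (num - k) then
      PySem.Set.add st.2 (if num ≤ num - k then (num, num - k) else (num - k, num))
    else st.2
  let res := if num - k ≠ num + k ∧ st.1.contains (num + k) = true then
      PySem.Set.add res (if num ≤ num + k then (num, num + k) else (num + k, num))
    else res
  (st.1.modify num 0 (· + 1), res)

-- folding over enumerate with the index ignored is folding over the list
lemma pv_foldl_enum {σ : Type} (f : σ → Int → σ) :
    ∀ (l : List Int) (i : Int) (st : σ),
      (PySem.List.enumerate l i).foldl (fun st p => f st p.2) st = l.foldl f st := by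
  intro l
  induction l with
  | nil => intro i st; simp [PySem.List.enumerate]
  | cons x t ih => intro i st; simp [PySem.List.enumerate, List.foldl_cons, ih]

-- the pairs A's loop adds while scanning l, after having already seen s
def pvNew (k : Int) : List Int → List Int → (Int × Int) → Prop
  | _, [], _ => False
  | s, num :: t, q =>
      (q = (if num ≤ num - k then (num, num - k) else (num - k, num)) ∧ (num - k) ∈ s)
      ∨ (q = (if num ≤ num + k then (num, num + k) else (num + k, num)) ∧ num - k ≠ num + k ∧ (num + k) ∈ s)
      ∨ pvNew k (s ++ [num]) t q

-- loop invariant for A's fold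
lemma pv_inv (k : Int) :
    ∀ (l s : List Int) (c : PySem.Dict Int Int) (r : PySem.Set (Int × Int)),
      (∀ m, c.contains m = true ↔ m ∈ s) → r.Nodup →
      (∀ m, (l.foldl (pvStep k) (c, r)).1.contains m = true ↔ m ∈ s ++ l)
      ∧ (l.foldl (pvStep k) (c, r)).2.Nodup
      ∧ (∀ q, q ∈ (l.foldl (pvStep k) (c, r)).2 ↔ q ∈ r ∨ pvNew k s l q) := by
  intro l
  induction l with
  | nil =>
    intro s c r hc hr
    refine ⟨by simpa using hc, hr, fun q => by simp [pvNew]⟩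
  | cons num t ih =>
    intro s c r hc hr
    have hstep : (num :: t).foldl (pvStep k) (c, r) = t.foldl (pvStep k) (pvStep k (c, r) num) := rfl
    set r1 := (pvStep k (c, r) num).2 with hr1
    have hc1 : ∀ m, (pvStep k (c, r) num).1.contains m = true ↔ m ∈ s ++ [num] := by
      intro m
      simp only [pvStep, PySem.Dict.contains_modify, Bool.or_eq_true, beq_iff_eq, hc m,
        List.mem_append, List.mem_singleton]
      tauto
    have hr1nd : r1.Nodup := by
      simp only [hr1, pvStep]
      split_ifs <;> first
        | exact PySem.Set.nodup_add _ _ (PySem.Set.nodup_add _ _ hr)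
        | exact PySem.Set.nodup_add _ _ hr
        | exact hr
    have hr1mem : ∀ q, q ∈ r1 ↔ q ∈ r
        ∨ (q = (if num ≤ num - k then (num, num - k) else (num - k, num)) ∧ (num - k) ∈ s)
        ∨ (q = (if num ≤ num + k then (num, num + k) else (num + k, num)) ∧ num - k ≠ num + k ∧ (num + k) ∈ s) := by
      intro q
      have m1 := hc (num - k)
      have m2 := hc (num + k)
      simp only [hr1, pvStep]
      split_ifs <;> (try simp only [PySem.Set.mem_add]) <;> tauto
    obtain ⟨ha, hb, hm⟩ := ih (s ++ [num]) (pvStep k (c, r) num).1 r1 hc1 hr1nd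
    refine ⟨?_, ?_, ?_⟩
    · intro m
      rw [hstep]
      have := ha m
      simpa [List.append_assoc] using this
    · rw [hstep]; exact hb
    · intro q
      rw [hstep]
      rw [hm q, hr1mem q]
      simp only [pvNew]
      tauto
  
-- normalising A's two conditional pairs into the (x, x + |k|) form, k ≠ 0
lemma pv_pair_norm (k num : Int) (hk : k ≠ 0) (s : List Int) (q : Int × Int) :
    ((q = (if num ≤ num - k then (num, num - k) else (num - k, num)) ∧ (num - k) ∈ s)
      ∨ (q = (if num ≤ num + k then (num, num + k) else (num + k, num)) ∧ num - k ≠ num + k ∧ (num + k) ∈ s))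
    ↔ ∃ x, q = (x, x + |k|) ∧ ((x = num ∧ x + |k| ∈ s) ∨ (x + |k| = num ∧ x ∈ s)) := by
  obtain ⟨d, hd⟩ : ∃ d, |k| = d := ⟨_, rfl⟩
  have hdk : d = k ∨ d = -k := by rw [← hd]; exact abs_choice k
  have hdpos : 0 ≤ d := by rw [← hd]; exact abs_nonneg k
  rw [hd]
  rcases lt_or_gt_of_ne hk with hsign | hsign
  · have hde : d = -k := by omega
    constructor
    · rintro (⟨hq, hs⟩ | ⟨hq, _, hs⟩)
      · refine ⟨num, ?_, Or.inl ⟨rfl, ?_⟩⟩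
        · rw [hq, if_pos (by omega)]
          simp only [Prod.mk.injEq, true_and]
          omega
        · rwa [show num + d = num - k by omega]
      · refine ⟨num + k, ?_, Or.inr ⟨by omega, hs⟩⟩
        rw [hq, if_neg (by omega)]
        simp only [Prod.mk.injEq, true_and]
        omega
    · rintro ⟨x, hq, (⟨hx, hs⟩ | ⟨hx, hs⟩)⟩
      · refine Or.inl ⟨?_, ?_⟩
        · rw [hq, if_pos (by omega)]
          simp only [Prod.mk.injEq]
          omega
        · rwa [show num - k = x + d by omega]
      · refine Or.inr ⟨?_, by omega, ?_⟩
        · rw [hq, if_neg (by omega)]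
          simp only [Prod.mk.injEq]
          omega
        · rwa [show num + k = x by omega]
  · have hde : d = k := by omega
    constructor
    · rintro (⟨hq, hs⟩ | ⟨hq, _, hs⟩)
      · refine ⟨num - k, ?_, Or.inr ⟨by omega, hs⟩⟩
        rw [hq, if_neg (by omega)]
        simp only [Prod.mk.injEq, true_and]
        omega
      · refine ⟨num, ?_, Or.inl ⟨rfl, ?_⟩⟩
        · rw [hq, if_pos (by omega)]
          simp only [Prod.mk.injEq, true_and]
          omega
        · rwa [show num + d = num + k by omega]
    · rintro ⟨x, hq, (⟨hx, hs⟩ | ⟨hx, hs⟩)⟩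
      · refine Or.inr ⟨?_, by omega, ?_⟩
        · rw [hq, if_pos (by omega)]
          simp only [Prod.mk.injEq]
          omega
        · rwa [show num + k = x + d by omega]
      · refine Or.inl ⟨?_, ?_⟩
        · rw [hq, if_neg (by omega)]
          simp only [Prod.mk.injEq]
          omega
        · rwa [show num - k = x by omega]

-- characterisation of pvNew for k ≠ 0
lemma pv_new_char_ne (k : Int) (hk : k ≠ 0) :
    ∀ (l s : List Int) (q : Int × Int),
      pvNew k s l q ↔ ∃ x, q = (x, x + |k|) ∧
        ((x ∈ l ∧ x + |k| ∈ s) ∨ (x + |k| ∈ l ∧ x ∈ s) ∨ (x ∈ l ∧ x + |k| ∈ l)) := by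
  intro l
  induction l with
  | nil => intro s q; simp [pvNew]
  | cons num t ih =>
    intro s q
    have hd : |k| ≠ 0 := by simpa using hk
    simp only [pvNew]
    rw [ih (s ++ [num]) q]
    constructor
    · rintro (h | h | ⟨x, hq, hcase⟩)
      · obtain ⟨x, hq, hc⟩ := (pv_pair_norm k num hk s q).mp (Or.inl h)
        rcases hc with ⟨hx, hs⟩ | ⟨hx, hs⟩
        · exact ⟨x, hq, Or.inl ⟨by simp [hx], hs⟩⟩
        · exact ⟨x, hq, Or.inr (Or.inl ⟨by simp [hx], hs⟩)⟩
      · obtain ⟨x, hq, hc⟩ := (pv_pair_norm k num hk s q).mp (Or.inr h)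
        rcases hc with ⟨hx, hs⟩ | ⟨hx, hs⟩
        · exact ⟨x, hq, Or.inl ⟨by simp [hx], hs⟩⟩
        · exact ⟨x, hq, Or.inr (Or.inl ⟨by simp [hx], hs⟩)⟩
      · refine ⟨x, hq, ?_⟩
        simp only [List.mem_append, List.mem_cons] at hcase ⊢
        tauto
    · rintro ⟨x, hq, hcase⟩
      simp only [List.mem_cons] at hcase
      rcases hcase with ⟨hx1, hs⟩ | ⟨hx1, hs⟩ | ⟨hx1, hx2⟩
      · rcases hx1 with heq | hmem
        · rcases (pv_pair_norm k num hk s q).mpr ⟨x, hq, Or.inl ⟨heq, hs⟩⟩ with h | h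
          · exact Or.inl h
          · exact Or.inr (Or.inl h)
        · exact Or.inr (Or.inr ⟨x, hq, Or.inl ⟨hmem, by simp [hs]⟩⟩)
      · rcases hx1 with heq | hmem
        · rcases (pv_pair_norm k num hk s q).mpr ⟨x, hq, Or.inr ⟨heq, hs⟩⟩ with h | h
          · exact Or.inl h
          · exact Or.inr (Or.inl h)
        · exact Or.inr (Or.inr ⟨x, hq, Or.inr (Or.inl ⟨hmem, by simp [hs]⟩)⟩)
      · rcases hx1 with heqx | hmx
        · rcases hx2 with heqy | hmy
          · exact absurd (show |k| = 0 by linarith) hd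
          · exact Or.inr (Or.inr ⟨x, hq, Or.inr (Or.inl ⟨hmy, by simp [heqx]⟩)⟩)
        · rcases hx2 with heqy | hmy
          · exact Or.inr (Or.inr ⟨x, hq, Or.inl ⟨hmx, by simp [heqy]⟩⟩)
          · exact Or.inr (Or.inr ⟨x, hq, Or.inr (Or.inr ⟨hmx, hmy⟩)⟩)

-- characterisation of pvNew for k = 0
lemma pv_new_char_zero :
    ∀ (l s : List Int) (q : Int × Int),
      pvNew 0 s l q ↔ ∃ x, q = (x, x) ∧ x ∈ l ∧ (x ∈ s ∨ 2 ≤ l.count x) := by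
  intro l
  induction l with
  | nil => intro s q; simp [pvNew]
  | cons num t ih =>
    intro s q
    simp only [pvNew, sub_zero, add_zero, ite_self, ne_eq, not_true_eq_false,
      false_and, and_false, false_or]
    rw [ih (s ++ [num]) q]
    constructor
    · rintro (⟨hq, hs⟩ | ⟨x, hq, hx, hc⟩)
      · exact ⟨num, hq, List.mem_cons_self .., Or.inl hs⟩
      · refine ⟨x, hq, List.mem_cons_of_mem _ hx, ?_⟩
        simp only [List.mem_append, List.mem_singleton] at hc
        rcases hc with (hc | hc) | hc
        · exact Or.inl hc
        · right; rw [List.count_cons]; simp [hc]; exact hc ▸ hx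
        · right; rw [List.count_cons]; omega
    · rintro ⟨x, hq, hx, hc⟩
      rcases List.mem_cons.mp hx with heq | hmem
      · subst heq
        rcases hc with hs | hcnt
        · exact Or.inl ⟨hq, hs⟩
        · rw [List.count_cons_self] at hcnt
          have hxt : x ∈ t := List.count_pos_iff.mp (by omega)
          exact Or.inr ⟨x, hq, hxt, Or.inl (by simp)⟩
      · refine Or.inr ⟨x, hq, hmem, ?_⟩
        rcases hc with hs | hcnt
        · exact Or.inl (by simp [hs])
        · rw [List.count_cons] at hcnt
          by_cases hxn : x = num
          · exact Or.inl (by simp [hxn])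
          · refine Or.inr ?_
            split at hcnt
            · exact absurd (beq_iff_eq.mp ‹(num == x) = true›).symm hxn
            · omega

-- generic counting step: a Nodup list whose members are the injective image of a Nodup list
lemma pv_length_eq {α β : Type} [DecidableEq α] [DecidableEq β]
    (r : List β) (L : List α) (f : α → β)
    (hr : r.Nodup) (hL : L.Nodup) (hf : Function.Injective f)
    (hmem : ∀ q, q ∈ r ↔ ∃ x ∈ L, q = f x) :
    r.length = L.length := by
  have hperm : r.Perm (L.map f) := by
    rw [List.perm_ext_iff_of_nodup hr (hL.map hf)]
    intro q
    rw [hmem q]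
    simp [eq_comm]
  calc r.length = (L.map f).length := hperm.length_eq
    _ = L.length := List.length_map ..

-- the two branch predicates agree with the final pair-set membership; main equality
lemma pv_main (nums : List Int) (k : Int) : findPairs nums k = findPairs_alt nums k := by
  have hempty : ∀ m : Int, (PySem.Dict.empty (κ := Int) (ν := Int)).contains m = true ↔ m ∈ ([] : List Int) := by
    intro m; simp [PySem.Dict.contains_empty]
  obtain ⟨-, hnd, hmem⟩ := pv_inv k nums [] PySem.Dict.empty PySem.Set.empty hempty (by simp [PySem.Set.empty])
  have hA : findPairs nums k =
      ((nums.foldl (pvStep k) (PySem.Dict.empty, PySem.Set.empty)).2.length : Int) := by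
    show PySem.Set.len ((PySem.List.enumerate nums).foldl (fun st p => pvStep k st p.2)
      (PySem.Dict.empty, PySem.Set.empty)).2 = _
    rw [pv_foldl_enum (pvStep k) nums 0]
    rfl
  set r := (nums.foldl (pvStep k) (PySem.Dict.empty, PySem.Set.empty)).2 with hrdef
  by_cases hk : k = 0
  · subst hk
    have hmem' : ∀ q, q ∈ r ↔ ∃ x ∈ (PySem.Set.ofList nums).filter (fun x => decide (2 ≤ nums.count x)),
        q = (x, x) := by
      intro q
      rw [hmem q, pv_new_char_zero nums [] q]
      simp only [PySem.Set.empty, List.not_mem_nil, false_or, List.mem_filter,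
        PySem.Set.mem_ofList, decide_eq_true_eq]
      constructor
      · rintro ⟨x, hq, hx, hc⟩
        exact ⟨x, ⟨hx, by simpa using hc⟩, hq⟩
      · rintro ⟨x, ⟨hx, hc⟩, hq⟩
        exact ⟨x, hq, hx, by simpa using hc⟩
    have hlen := pv_length_eq r _ (fun x => (x, x)) hnd
      ((PySem.Set.nodup_ofList nums).filter _)
      (fun a b h => by simpa using congrArg Prod.fst h) hmem'
    have hB : findPairs_alt nums 0 =
        (((PySem.Set.ofList nums).filter (fun x => decide (2 ≤ nums.count x))).length : Int) := by
      show (((PySem.Dict.counter nums).values.countP (fun c => decide (2 ≤ c)) : Nat) : Int) = _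
      rw [PySem.Dict.values_eq_map_keys _ (PySem.Dict.nodup_keys_counter nums) 0]
      rw [List.countP_map, PySem.Dict.keys_counter]
      rw [List.countP_eq_length_filter]
      apply congrArg Int.ofNat
      apply congrArg List.length
      apply List.filter_congr
      intro x hx
      simp [Function.comp, PySem.Dict.getD_counter]
    rw [hA, hB, hlen]
  · have hd : |k| ≠ 0 := by simpa using hk
    have hmem' : ∀ q, q ∈ r ↔ ∃ x ∈ (PySem.Set.ofList nums).filter
        (fun x => (PySem.Dict.counter nums).contains (x + |k|)), q = (x, x + |k|) := by
      intro q
      rw [hmem q, pv_new_char_ne k hk nums [] q]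
      simp only [PySem.Set.empty, List.not_mem_nil, false_or, and_false, false_or, List.mem_filter,
        PySem.Set.mem_ofList, PySem.Dict.contains_counter, List.contains_iff_mem]
      constructor
      · rintro ⟨x, hq, hx, hy⟩
        exact ⟨x, ⟨hx, by simpa using hy⟩, hq⟩
      · rintro ⟨x, ⟨hx, hy⟩, hq⟩
        exact ⟨x, hq, hx, by simpa using hy⟩
    have hlen := pv_length_eq r _ (fun x => (x, x + |k|)) hnd
      ((PySem.Set.nodup_ofList nums).filter _)
      (fun a b h => by simpa using congrArg Prod.fst h) hmem'
    have hB : findPairs_alt nums k =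
        (((PySem.Set.ofList nums).filter
          (fun x => (PySem.Dict.counter nums).contains (x + |k|))).length : Nat) := by
      show (if |k| = 0 then _ else (((PySem.Dict.counter nums).keys.countP
        (fun x => (PySem.Dict.counter nums).contains (x + |k|)) : Nat) : Int)) = _
      rw [if_neg hd, PySem.Dict.keys_counter, List.countP_eq_length_filter]
    rw [hA, hB, hlen]

-- ===== VERDICT (by name: the statement is the Claim_ definition above) =====
theorem findPairs_spec : Claim_equal_findPairs := by
  intro nums k _
  unfold Spec_findPairs
  exact pv_main nums k
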